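-- pv_equiv track=rewrite | github.com/thebenkogan/everybody-codes-2024 | 8.py | blocks_needed
-- ===== SOURCE A (Python) =====
-- from collections import defaultdict
--
-- def blocks_needed(n, layers):
--     mod = 10
--     thickness = 1
--     width = 1
--     pos = 0
--     cols = defaultdict(int)
--     cols[0] = 1
--     for _ in range(layers - 1):
--         thickness = (thickness * n) % mod + mod
--         pos += 1
--         width += 2
--         for i in range(-pos, pos + 1):
--             cols[i] += thickness
--
--     total = sum(cols.values())
--     for p, col in cols.items():
--         if abs(p) == pos:
--             continue
--         remove = (width * n * col) % mod
--         total -= remove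
--
--     return total
-- ===== SOURCE B (Python) =====
-- def blocks_needed(n, layers):
--     if layers <= 1:
--         return 1
--     ts = []
--     t = 1
--     for _ in range(layers - 1):
--         t = (t * n) % 10 + 10
--         ts.append(t)
--     width = 2 * layers - 1
--     total = 1 + sum((2 * k + 3) * ts[k] for k in range(len(ts)))
--     acc = ts[-1]
--     for j in range(len(ts) - 1, 0, -1):
--         acc += ts[j - 1]
--         total -= 2 * ((width * n * acc) % 10)
--     total -= (width * n * (1 + acc)) % 10
--     return total
-- ===== Notes on version B (the rewrite author's own statement) =====
-- stated objective: faster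
-- what changed: Replaces the per-layer dict pass that adds the new thickness to every column by a closed-form weighted sum thickness_k*(2k+1) plus one backward suffix-sum pass for the per-column removals
import Mathlib
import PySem

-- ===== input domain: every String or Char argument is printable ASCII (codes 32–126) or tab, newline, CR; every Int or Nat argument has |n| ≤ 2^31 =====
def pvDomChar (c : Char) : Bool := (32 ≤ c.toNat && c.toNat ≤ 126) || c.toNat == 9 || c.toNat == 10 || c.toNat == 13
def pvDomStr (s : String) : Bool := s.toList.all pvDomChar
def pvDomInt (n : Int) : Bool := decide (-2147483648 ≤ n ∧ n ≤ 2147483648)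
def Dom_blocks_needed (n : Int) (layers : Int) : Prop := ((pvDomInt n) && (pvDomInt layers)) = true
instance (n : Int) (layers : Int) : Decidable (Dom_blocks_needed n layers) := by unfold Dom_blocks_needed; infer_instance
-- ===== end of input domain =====

-- B replaces A's quadratic per-layer dict update of every column by the thickness
-- sequence, a weighted sum thickness_k*(2k+1) and one backward suffix-sum pass (faster).

-- ===== PORT A =====
-- state: (thickness, width, pos, cols); Python's 'mod' variable (always 10) is inlined.
-- defaultdict access cols[i] += t is insert i (getD i 0 + t) (a missing key appends, like Python).
def blocks_needed (n : Int) (layers : Int) : Int :=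
  let st :=
    (PySem.List.pyRange 0 (layers - 1) 1).foldl
      (fun (st : Int × Int × Int × PySem.Dict Int Int) _ =>
        let thickness := PySem.Int.mod (st.1 * n) 10 + 10
        let pos := st.2.2.1 + 1
        let width := st.2.1 + 2
        let cols := (PySem.List.pyRange (-pos) (pos + 1) 1).foldl
          (fun c i => c.insert i (c.getD i 0 + thickness)) st.2.2.2
        (thickness, width, pos, cols))
      (1, 1, 0, (PySem.Dict.empty).insert 0 1)
  let width := st.2.1
  let pos := st.2.2.1
  let cols := st.2.2.2
  let total := (PySem.Dict.values cols).foldl (fun a v => a + v) 0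
  (PySem.Dict.items cols).foldl
    (fun total pc =>
      if (if pc.1 < 0 then -pc.1 else pc.1) = pos then total
      else total - PySem.Int.mod (width * n * pc.2) 10)
    total

-- ===== PORT B =====
-- ts[k], ts[j-1], ts[-1] are always in range in Source B, so pyGetD with default 0 is exact.
def blocks_needed_alt (n : Int) (layers : Int) : Int :=
  if layers ≤ 1 then 1
  else
    let st := (PySem.List.pyRange 0 (layers - 1) 1).foldl
      (fun (st : List Int × Int) _ =>
        let t := PySem.Int.mod (st.2 * n) 10 + 10
        (st.1 ++ [t], t)) ([], 1)
    let ts := st.1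
    let width := 2 * layers - 1
    let total := 1 + (PySem.List.pyRange 0 (PySem.List.len ts) 1).foldl
        (fun a k => a + (2 * k + 3) * PySem.List.pyGetD ts k 0) 0
    let acc := PySem.List.pyGetD ts (-1) 0
    let st2 := (PySem.List.pyRange (PySem.List.len ts - 1) 0 (-1)).foldl
      (fun (st : Int × Int) j =>
        let acc := st.2 + PySem.List.pyGetD ts (j - 1) 0
        (st.1 - 2 * PySem.Int.mod (width * n * acc) 10, acc))
      (total, acc)
    st2.1 - PySem.Int.mod (width * n * (1 + st2.2)) 10

-- ===== PRECONDITION & SPEC =====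
def Spec_blocks_needed (n : Int) (layers : Int) (out : Int) : Prop := out = blocks_needed_alt n layers
instance (n : Int) (layers : Int) (out : Int) : Decidable (Spec_blocks_needed n layers out) := by unfold Spec_blocks_needed; infer_instance

-- ===== CLAIM (what is proved, stated in full; the proofs are below) =====
def Claim_equal_blocks_needed : Prop := ∀ (n : Int) (layers : Int), Dom_blocks_needed n layers → Spec_blocks_needed n layers (blocks_needed n layers)

-- ===== LEMMAS AND PROOFS =====

-- thickness after k iterations of the layer loop
def tval (n : Int) : Nat → Int
  | 0 => 1
  | k+1 => PySem.Int.mod (tval n k * n) 10 + 10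

-- suffix sum  tval j + tval (j+1) + … + tval K
def sfx (n : Int) (j K : Nat) : Int := ((List.range' j (K + 1 - j)).map (tval n)).sum

-- Σ_{m=1}^{k} (2m+1)·tval m
def wsum (n : Int) : Nat → Int
  | 0 => 0
  | k+1 => wsum n k + (2 * (k : Int) + 3) * tval n (k+1)

-- Σ_{i=1}^{j} (w·n·sfx i K) mod 10
def psum (n w : Int) (K : Nat) : Nat → Int
  | 0 => 0
  | j+1 => psum n w K j + PySem.Int.mod (w * n * sfx n (j+1) K) 10

-- the items list of cols after k iterations
def ek (n : Int) : Nat → List (Int × Int)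
  | 0 => [(0, 1)]
  | k+1 => (ek n k).map (fun kv => (kv.1, kv.2 + tval n (k+1))) ++
      [(-((k : Int) + 1), tval n (k+1)), ((k : Int) + 1, tval n (k+1))]

-- ts list built by B's first loop
def tsList (n : Int) (m : Nat) : List Int := (List.range' 1 m).map (tval n)

lemma sfx_self (n : Int) (K : Nat) : sfx n K K = tval n K := by
  unfold sfx
  rw [show K + 1 - K = 1 from by omega]
  simp [List.range']

lemma sfx_succ (n : Int) (j k : Nat) (h : j ≤ k + 1) :
    sfx n j (k+1) = sfx n j k + tval n (k+1) := by
  unfold sfx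
  rw [show k + 1 + 1 - j = (k + 1 - j) + 1 from by omega, List.range'_1_concat,
    List.map_append, List.sum_append, show j + (k + 1 - j) = k + 1 from by omega]
  simp

lemma sfx_cons (n : Int) (j k : Nat) (_h1 : 1 ≤ j) (h2 : j ≤ k) :
    sfx n j k = tval n j + sfx n (j+1) k := by
  unfold sfx
  rw [show k + 1 - j = (k - j) + 1 from by omega, List.range'_succ,
    show k + 1 - (j + 1) = k - j from by omega]
  simp

lemma ek_eq (n : Int) (k : Nat) :
    ek n k = (0, 1 + sfx n 1 k) ::
      (List.range' 1 k).flatMap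
        (fun (j : Nat) => [(-(j : Int), sfx n j k), ((j : Int), sfx n j k)]) := by
  induction k with
  | zero => simp [ek, sfx]
  | succ k ih =>
    simp only [ek]
    rw [ih, List.map_cons, List.map_flatMap, List.range'_1_concat, List.flatMap_append]
    refine congrArg₂ List.cons ?_ ?_
    · rw [sfx_succ n 1 k (by omega)]
      exact Prod.ext rfl (by simp [add_assoc])
    · rw [List.flatMap_congr
        (g := fun (j : Nat) => [(-(j : Int), sfx n j (k+1)), ((j : Int), sfx n j (k+1))])
        (by intro j hj
            rw [List.mem_range'_1] at hj
            simp only [List.map_cons, List.map_nil]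
            rw [sfx_succ n j k (by omega)])]
      refine congrArg₂ _ rfl ?_
      rw [show (1 + k : Nat) = k + 1 from by omega]
      simp only [List.flatMap_cons, List.flatMap_nil, List.append_nil]
      rw [sfx_self]
      push_cast
      ring_nf

lemma ek_keys (n : Int) (k : Nat) : (ek n k).map Prod.fst = (0 : Int) ::
    (List.range' 1 k).flatMap (fun (j : Nat) => [-(j : Int), (j : Int)]) := by
  rw [ek_eq, List.map_cons, List.map_flatMap]
  rfl

lemma mem_ek_keys (n : Int) (k : Nat) (x : Int) :
    x ∈ (ek n k).map Prod.fst ↔ -(k : Int) ≤ x ∧ x ≤ (k : Int) := by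
  rw [ek_keys]
  simp only [List.mem_cons, List.mem_flatMap, List.mem_range'_1, List.not_mem_nil, or_false]
  constructor
  · rintro (rfl | ⟨j, ⟨h1, h2⟩, (rfl | rfl)⟩) <;> constructor <;> omega
  · rintro ⟨h1, h2⟩
    rcases eq_or_ne x 0 with rfl | hx
    · exact Or.inl rfl
    · exact Or.inr ⟨x.natAbs, ⟨by omega, by omega⟩, by omega⟩

lemma ek_keys_nodup (n : Int) (k : Nat) : ((ek n k).map Prod.fst).Nodup := by
  induction k with
  | zero => rw [ek_keys]; simp
  | succ k ih =>
    have e : (ek n (k+1)).map Prod.fst =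
        (ek n k).map Prod.fst ++ [-((k : Int) + 1), (k : Int) + 1] := by
      rw [ek_keys, ek_keys, List.range'_1_concat, List.flatMap_append,
        show (1 + k : Nat) = k + 1 from by omega]
      simp only [List.flatMap_cons, List.flatMap_nil, List.append_nil, List.cons_append]
      push_cast
      ring_nf
    rw [e]
    refine List.Nodup.append ih (by simp; omega) ?_
    intro x hx hx2
    have := (mem_ek_keys n k x).mp hx
    simp only [List.mem_cons, List.not_mem_nil, or_false] at hx2
    rcases hx2 with rfl | rfl <;> omega

lemma ek_len (n : Int) (k : Nat) : (ek n k).length = 2 * k + 1 := by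
  induction k with
  | zero => simp [ek]
  | succ k ih => simp [ek, ih]; omega

lemma ek_vsum (n : Int) (k : Nat) :
    ((ek n k).map (fun kv : Int × Int => kv.2)).sum = 1 + wsum n k := by
  induction k with
  | zero => simp [ek, wsum]
  | succ k ih =>
    simp only [ek, List.map_append, List.sum_append, List.map_map]
    have h1 : (ek n k).map ((fun kv : Int × Int => kv.2) ∘ fun kv => (kv.1, kv.2 + tval n (k+1))) =
        (ek n k).map (fun kv => kv.2 + tval n (k+1)) := rfl
    rw [h1, PySem.List.sum_map_add_int (ek n k) (fun kv => kv.2) (fun _ => tval n (k+1)),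
      PySem.List.sum_map_const_int, ek_len, ih]
    simp only [wsum, List.map_cons, List.map_nil, List.sum_cons, List.sum_nil]
    push_cast
    ring

-- a fold that subtracts f of every element
lemma foldl_sub_eq {α : Type} (l : List α) (f : α → Int) (a : Int) :
    l.foldl (fun acc x => acc - f x) a = a - (l.map f).sum := by
  induction l generalizing a with
  | nil => simp
  | cons h t ih => simp [ih]; ring

lemma sum_pair_flatMap (l : List Nat) (g h : Nat → Int) :
    (l.flatMap (fun j => [g j, h j])).sum = (l.map g).sum + (l.map h).sum := by
  induction l with
  | nil => simp
  | cons x t ih => simp [ih]; ring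

lemma psum_eq (n w : Int) (K : Nat) : ∀ m : Nat,
    ((List.range' 1 m).map (fun j => PySem.Int.mod (w * n * sfx n j K) 10)).sum = psum n w K m := by
  intro m
  induction m with
  | zero => simp [psum]
  | succ m ih =>
    rw [List.range'_1_concat, List.map_append, List.sum_append, ih,
      show (1 + m : Nat) = m + 1 from by omega]
    simp [psum]

-- generic "bump every key in ks" fold over a dict
lemma bump_fold (t : Int) : ∀ (ks : List Int) (c : PySem.Dict Int Int), ks.Nodup → c.keys.Nodup →
    (ks.foldl (fun c i => c.insert i (c.getD i 0 + t)) c).items =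
      c.items.map (fun kv => if kv.1 ∈ ks then (kv.1, kv.2 + t) else kv)
      ++ (ks.filter (fun i => !(c.contains i))).map (fun i => (i, t)) := by
  intro ks
  induction ks with
  | nil =>
    intro c _ _
    simp
  | cons i rest ih =>
    intro c hnd hc
    have hir : i ∉ rest := (List.nodup_cons.mp hnd).1
    have hndr : rest.Nodup := (List.nodup_cons.mp hnd).2
    have hc'nd : (c.insert i (c.getD i 0 + t)).keys.Nodup :=
      PySem.Dict.nodup_keys_insert c i _ hc
    rw [List.foldl_cons, ih (c.insert i (c.getD i 0 + t)) hndr hc'nd]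
    have hfilter : rest.filter (fun x => !((c.insert i (c.getD i 0 + t)).contains x)) =
        rest.filter (fun x => !(c.contains x)) := by
      refine List.filter_congr ?_
      intro x hx
      rw [PySem.Dict.contains_insert]
      have hxi : (x == i) = false := by
        simp only [beq_eq_false_iff_ne, ne_eq]
        intro h; exact hir (h ▸ hx)
      rw [hxi, Bool.false_or]
    rw [hfilter]
    by_cases hcont : c.contains i = true
    · rw [PySem.Dict.items_insert_of_contains c _ hcont, List.map_map]
      have hfc : List.filter (fun x => !(c.contains x)) (i :: rest) =
          List.filter (fun x => !(c.contains x)) rest := by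
        rw [List.filter_cons, hcont]
        simp
      rw [hfc]
      refine congrArg₂ _ ?_ rfl
      refine List.map_congr_left ?_
      intro kv hkv
      by_cases hk : kv.1 = i
      · have hmem : (i, kv.2) ∈ c.items := by
          have hkv2 : kv = (i, kv.2) := by rw [← hk]
          rw [← hkv2]; exact hkv
        have hval : c.getD i 0 = kv.2 := PySem.Dict.getD_of_mem_items c hmem hc 0
        simp only [Function.comp_apply, hk, beq_self_eq_true, if_true]
        rw [if_neg hir, if_pos (by simp : i ∈ i :: rest), hval]
      · have hbeq : (kv.1 == i) = false := by simp [hk]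
        simp only [Function.comp_apply, hbeq, Bool.false_eq_true, if_false]
        have hmm : kv.1 ∈ i :: rest ↔ kv.1 ∈ rest := by
          simp only [List.mem_cons]
          exact ⟨fun h => h.elim (fun h => absurd h hk) id, Or.inr⟩
        by_cases hr : kv.1 ∈ rest
        · rw [if_pos hr, if_pos (hmm.mpr hr)]
        · rw [if_neg hr, if_neg (fun h => hr (hmm.mp h))]
    · have hcf : c.contains i = false := by
        cases h : c.contains i
        · rfl
        · exact absurd h hcont
      rw [PySem.Dict.items_insert_of_not_contains c _ hcf,
        PySem.Dict.getD_of_not_contains c 0 hcf, List.map_append]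
      have hfc : List.filter (fun x => !(c.contains x)) (i :: rest) =
          i :: List.filter (fun x => !(c.contains x)) rest := by
        rw [List.filter_cons, hcf]
        simp
      rw [hfc]
      have hmapsingle : List.map (fun kv : Int × Int => if kv.1 ∈ rest then (kv.1, kv.2 + t) else kv)
          [((i : Int), (0 : Int) + t)] = [((i : Int), t)] := by
        simp [if_neg hir]
      rw [hmapsingle]
      have hmain : c.items.map (fun kv => if kv.1 ∈ rest then (kv.1, kv.2 + t) else kv) =
          c.items.map (fun kv => if kv.1 ∈ i :: rest then (kv.1, kv.2 + t) else kv) := by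
        refine List.map_congr_left ?_
        intro kv hkv
        have hki : kv.1 ≠ i := by
          intro h
          have hink : kv.1 ∈ c.keys := PySem.Dict.mem_keys_of_mem_items c hkv
          rw [PySem.Dict.contains_eq_decide_mem_keys] at hcf
          simp only [decide_eq_false_iff_not] at hcf
          exact hcf (h ▸ hink)
        have hmm : kv.1 ∈ i :: rest ↔ kv.1 ∈ rest := by
          simp only [List.mem_cons]
          exact ⟨fun h => h.elim (fun h => absurd h hki) id, Or.inr⟩
        by_cases hr : kv.1 ∈ rest
        · rw [if_pos hr, if_pos (hmm.mpr hr)]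
        · rw [if_neg hr, if_neg (fun h => hr (hmm.mp h))]
      rw [hmain, List.map_cons, List.append_assoc]
      rfl

lemma mk_contains (n : Int) (k : Nat) (x : Int) :
    (PySem.Dict.mk (ek n k)).contains x = decide (-(k : Int) ≤ x ∧ x ≤ (k : Int)) := by
  rw [PySem.Dict.contains_eq_decide_mem_keys, decide_eq_decide, PySem.Dict.keys_mk]
  exact mem_ek_keys n k x

-- one iteration of A's inner column loop, on the dict after k iterations
lemma inner_fold (n : Int) (k : Nat) (t : Int) :
    (PySem.List.pyRange (-((k : Int) + 1)) (((k : Int) + 1) + 1) 1).foldl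
      (fun c i => c.insert i (c.getD i 0 + t)) (PySem.Dict.mk (ek n k))
    = PySem.Dict.mk ((ek n k).map (fun kv => (kv.1, kv.2 + t)) ++
        [(-((k : Int) + 1), t), ((k : Int) + 1, t)]) := by
  apply PySem.Dict.ext
  rw [bump_fold t _ _ (PySem.List.nodup_pyRange_one _ _)
    (by rw [PySem.Dict.keys_mk]; exact ek_keys_nodup n k)]
  show (ek n k).map _ ++ _ = _
  refine congrArg₂ _ ?_ ?_
  · refine List.map_congr_left ?_
    intro kv hkv
    have hmem : kv.1 ∈ (ek n k).map Prod.fst := List.mem_map_of_mem hkv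
    have hb := (mem_ek_keys n k kv.1).mp hmem
    rw [if_pos (PySem.List.mem_pyRange_one.mpr ⟨by omega, by omega⟩)]
  · have hdec : PySem.List.pyRange (-((k : Int) + 1)) (((k : Int) + 1) + 1) 1 =
        -((k : Int) + 1) :: (PySem.List.pyRange (-(k : Int)) ((k : Int) + 1) 1 ++ [(k : Int) + 1]) := by
      rw [PySem.List.pyRange_one_cons (by omega),
        show (-((k : Int) + 1) + 1) = -(k : Int) from by ring,
        PySem.List.pyRange_one_succ_right (by omega)]
    rw [hdec, List.filter_cons, List.filter_append]
    have h1 : (!(PySem.Dict.mk (ek n k)).contains (-((k : Int) + 1))) = true := by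
      rw [mk_contains]
      simp only [Bool.not_eq_true', decide_eq_false_iff_not]
      omega
    have h2 : List.filter (fun i => !(PySem.Dict.mk (ek n k)).contains i)
        (PySem.List.pyRange (-(k : Int)) ((k : Int) + 1) 1) = [] := by
      rw [List.filter_eq_nil_iff]
      intro x hx
      have hb := PySem.List.mem_pyRange_one.mp hx
      rw [mk_contains]
      simp only [Bool.not_eq_true', decide_eq_false_iff_not, Decidable.not_not]
      omega
    have h3 : List.filter (fun i => !(PySem.Dict.mk (ek n k)).contains i) [(k : Int) + 1] =
        [(k : Int) + 1] := by
      rw [List.filter_singleton]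
      have hcc : (!(PySem.Dict.mk (ek n k)).contains ((k : Int) + 1)) = true := by
        rw [mk_contains]
        simp only [Bool.not_eq_true', decide_eq_false_iff_not]
        omega
      rw [hcc]
      simp
    rw [h1, h2, h3]
    simp

-- the layer loop of A
lemma A_loop (n : Int) (k : Nat) :
    (PySem.List.pyRange 0 (k : Int) 1).foldl
      (fun (st : Int × Int × Int × PySem.Dict Int Int) _ =>
        let thickness := PySem.Int.mod (st.1 * n) 10 + 10
        let pos := st.2.2.1 + 1
        let width := st.2.1 + 2
        let cols := (PySem.List.pyRange (-pos) (pos + 1) 1).foldl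
          (fun c i => c.insert i (c.getD i 0 + thickness)) st.2.2.2
        (thickness, width, pos, cols))
      (1, 1, 0, (PySem.Dict.empty).insert 0 1)
    = (tval n k, 1 + 2 * (k : Int), (k : Int), PySem.Dict.mk (ek n k)) := by
  induction k with
  | zero =>
    rw [show ((0 : Nat) : Int) = 0 from rfl, PySem.List.pyRange_one_eq_nil (by omega)]
    rfl
  | succ k ih =>
    rw [show ((k + 1 : Nat) : Int) = (k : Int) + 1 from by push_cast; ring,
      PySem.List.pyRange_one_succ_right (by omega), List.foldl_append, ih]
    simp only [List.foldl_cons, List.foldl_nil]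
    rw [inner_fold n k (PySem.Int.mod (tval n k * n) 10 + 10)]
    refine Prod.ext rfl (Prod.ext (by push_cast; ring) (Prod.ext (by push_cast; ring) ?_))
    show PySem.Dict.mk _ = PySem.Dict.mk (ek n (k+1))
    rfl

-- A's removal loop over the final dict items
lemma rem_A (n w T : Int) (K : Nat) (hK : 1 ≤ K) :
    (ek n K).foldl (fun tot pc => if (if pc.1 < 0 then -pc.1 else pc.1) = (K : Int) then tot
        else tot - PySem.Int.mod (w * n * pc.2) 10) T
    = T - PySem.Int.mod (w * n * (1 + sfx n 1 K)) 10 - 2 * psum n w K (K - 1) := by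
  obtain ⟨K', rfl⟩ : ∃ K', K = K' + 1 := ⟨K - 1, by omega⟩
  rw [ek_eq, List.range'_1_concat, show (1 + K' : Nat) = K' + 1 from by omega,
    List.flatMap_append]
  simp only [List.flatMap_cons, List.flatMap_nil, List.append_nil]
  rw [List.foldl_cons,
    if_neg (show ¬ ((if (0 : Int) < 0 then -(0 : Int) else (0 : Int)) = ((K' + 1 : Nat) : Int)) from by
      rw [if_neg (lt_irrefl 0)]; push_cast; omega)]
  rw [List.foldl_append]
  have hmid : ∀ (acc : Int), ∀ pc ∈ (List.range' 1 K').flatMap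
      (fun (j : Nat) => [(-(j : Int), sfx n j (K'+1)), ((j : Int), sfx n j (K'+1))]),
      (if (if pc.1 < 0 then -pc.1 else pc.1) = ((K' + 1 : Nat) : Int) then acc
        else acc - PySem.Int.mod (w * n * pc.2) 10) = acc - PySem.Int.mod (w * n * pc.2) 10 := by
    intro acc pc hpc
    rw [List.mem_flatMap] at hpc
    obtain ⟨j, hj, hpc⟩ := hpc
    rw [List.mem_range'_1] at hj
    simp only [List.mem_cons, List.not_mem_nil, or_false] at hpc
    rcases hpc with rfl | rfl <;>
      rw [if_neg (by split_ifs <;> push_cast <;> omega)]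
  rw [PySem.List.foldl_congr_mem _ _ _ _ hmid, foldl_sub_eq, List.map_flatMap]
  simp only [List.map_cons, List.map_nil, List.foldl_cons, List.foldl_nil]
  rw [sum_pair_flatMap (List.range' 1 K')
      (fun j => PySem.Int.mod (w * n * sfx n j (K'+1)) 10)
      (fun j => PySem.Int.mod (w * n * sfx n j (K'+1)) 10),
    psum_eq n w (K'+1) K']
  have hp1 : ((if -((K' + 1 : Nat) : Int) < 0 then -(-((K' + 1 : Nat) : Int))
      else -((K' + 1 : Nat) : Int)) = ((K' + 1 : Nat) : Int)) := by
    rw [if_pos (by push_cast; omega)]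
    ring
  have hp2 : ((if ((K' + 1 : Nat) : Int) < 0 then -((K' + 1 : Nat) : Int)
      else ((K' + 1 : Nat) : Int)) = ((K' + 1 : Nat) : Int)) := by
    rw [if_neg (by push_cast; omega)]
  rw [if_pos hp1, if_pos hp2, show (K' + 1 - 1 : Nat) = K' from by omega]
  ring

-- B's ts-building loop
lemma B_ts (n : Int) (m : Nat) :
    (PySem.List.pyRange 0 (m : Int) 1).foldl
      (fun (st : List Int × Int) _ =>
        let t := PySem.Int.mod (st.2 * n) 10 + 10
        (st.1 ++ [t], t)) ([], 1)
    = (tsList n m, tval n m) := by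
  induction m with
  | zero =>
    rw [show ((0 : Nat) : Int) = 0 from rfl, PySem.List.pyRange_one_eq_nil (by omega)]
    rfl
  | succ m ih =>
    rw [show ((m + 1 : Nat) : Int) = (m : Int) + 1 from by push_cast; ring,
      PySem.List.pyRange_one_succ_right (by omega), List.foldl_append, ih]
    simp only [List.foldl_cons, List.foldl_nil]
    refine Prod.ext ?_ rfl
    show tsList n m ++ [PySem.Int.mod (tval n m * n) 10 + 10] = tsList n (m+1)
    rw [tsList, tsList, List.range'_1_concat, List.map_append,
      show (1 + m : Nat) = m + 1 from by omega]
    rfl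

lemma tsList_len (n : Int) (m : Nat) : (tsList n m).length = m := by
  simp [tsList]

lemma tsList_get (n : Int) (m j : Nat) (h : j < m) :
    (tsList n m).getD j 0 = tval n (j + 1) := by
  rw [List.getD_eq_getElem _ _ (by simpa [tsList_len])]
  simp only [tsList, List.getElem_map, List.getElem_range']
  rw [show (1 + 1 * j : Nat) = j + 1 from by omega]

lemma B_last (n : Int) (m : Nat) (h : 1 ≤ m) :
    PySem.List.pyGetD (tsList n m) (-1) 0 = tval n m := by
  have hlen : (tsList n m).length = m := tsList_len n m
  simp only [PySem.List.pyGetD, PySem.List.pyGet?, PySem.List.pyIdx?, hlen]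
  rw [if_neg (by omega), if_pos (by omega)]
  show ((tsList n m)[m - (-(-1 : Int)).toNat]?).getD 0 = tval n m
  rw [show (m - (-(-1 : Int)).toNat) = m - 1 from by norm_num]
  rw [List.getElem?_eq_getElem (by rw [hlen]; omega)]
  simp only [Option.getD_some, tsList, List.getElem_map, List.getElem_range']
  rw [show (1 + 1 * (m - 1) : Nat) = m from by omega]

-- B's summation loop
lemma B_sum (n : Int) (M : Nat) : ∀ m : Nat, m ≤ M →
    (PySem.List.pyRange 0 (m : Int) 1).foldl
      (fun a k => a + (2 * k + 3) * PySem.List.pyGetD (tsList n M) k 0) 0 = wsum n m := by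
  intro m
  induction m with
  | zero =>
    intro _
    rw [show ((0 : Nat) : Int) = 0 from rfl, PySem.List.pyRange_one_eq_nil (by omega)]
    rfl
  | succ m ih =>
    intro hm
    rw [show ((m + 1 : Nat) : Int) = (m : Int) + 1 from by push_cast; ring,
      PySem.List.pyRange_one_succ_right (by omega), List.foldl_append, ih (by omega)]
    simp only [List.foldl_cons, List.foldl_nil]
    rw [PySem.List.pyGetD_natCast, tsList_get n M m (by omega)]
    simp [wsum]

-- B's backward suffix-sum loop
lemma B_back (n w : Int) (K : Nat) : ∀ j : Nat, j < K → ∀ tot : Int,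
    (PySem.List.pyRange (j : Int) 0 (-1)).foldl
      (fun (st : Int × Int) jj =>
        let acc := st.2 + PySem.List.pyGetD (tsList n K) (jj - 1) 0
        (st.1 - 2 * PySem.Int.mod (w * n * acc) 10, acc))
      (tot, sfx n (j+1) K)
    = (tot - 2 * psum n w K j, sfx n 1 K) := by
  intro j
  induction j with
  | zero =>
    intro _ tot
    rw [show ((0 : Nat) : Int) = 0 from rfl, PySem.List.pyRange_neg_one_eq_nil (by omega)]
    simp [psum]
  | succ j ih =>
    intro hj tot
    rw [show ((j + 1 : Nat) : Int) = (j : Int) + 1 from by push_cast; ring,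
      PySem.List.pyRange_neg_one_cons (by omega)]
    simp only [List.foldl_cons]
    rw [show ((j : Int) + 1 - 1) = ((j : Nat) : Int) from by ring]
    rw [PySem.List.pyGetD_natCast, tsList_get n K j (by omega)]
    rw [show sfx n (j + 1 + 1) K + tval n (j + 1) = sfx n (j + 1) K from by
      rw [sfx_cons n (j+1) K (by omega) (by omega)]; ring]
    rw [ih (by omega)]
    refine Prod.ext ?_ rfl
    simp only [psum]
    ring

-- ===== VERDICT (by name: the statement is the Claim_ definition above) =====
theorem blocks_needed_spec : Claim_equal_blocks_needed := by
  intro n layers _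
  unfold Spec_blocks_needed
  by_cases hl : layers ≤ 1
  · have hA1 : blocks_needed n layers = 1 := by
      unfold blocks_needed
      rw [PySem.List.pyRange_one_eq_nil (by omega)]
      simp only [List.foldl_nil]
      rw [show ((PySem.Dict.empty : PySem.Dict Int Int).insert 0 1) = PySem.Dict.mk [(0, 1)] from rfl]
      simp [PySem.Dict.values_mk]
    have hB1 : blocks_needed_alt n layers = 1 := by
      unfold blocks_needed_alt
      rw [if_pos hl]
    rw [hA1, hB1]
  · set K := (layers - 1).toNat with hKdef
    have hK1 : 1 ≤ K := by omega
    have hKc : layers - 1 = (K : Int) := by omega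
    have hA : blocks_needed n layers = 1 + wsum n K
        - PySem.Int.mod ((1 + 2 * (K : Int)) * n * (1 + sfx n 1 K)) 10
        - 2 * psum n (1 + 2 * (K : Int)) K (K - 1) := by
      unfold blocks_needed
      rw [hKc, A_loop n K]
      simp only [PySem.Dict.values_mk]
      rw [PySem.List.foldl_add _ (fun v => v) 0]
      simp only [List.map_id', zero_add]
      rw [ek_vsum, rem_A n (1 + 2 * (K : Int)) (1 + wsum n K) K hK1]
    have hB : blocks_needed_alt n layers = 1 + wsum n K
        - 2 * psum n (1 + 2 * (K : Int)) K (K - 1)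
        - PySem.Int.mod ((1 + 2 * (K : Int)) * n * (1 + sfx n 1 K)) 10 := by
      unfold blocks_needed_alt
      rw [if_neg hl, hKc, B_ts n K]
      simp only []
      rw [show (2 * layers - 1) = 1 + 2 * (K : Int) from by omega]
      rw [PySem.List.len_eq, tsList_len, B_sum n K K le_rfl, B_last n K hK1]
      rw [show ((K : Int) - 1) = ((K - 1 : Nat) : Int) from by omega]
      rw [show tval n K = sfx n ((K - 1) + 1) K from by
        rw [show (K - 1) + 1 = K from by omega, sfx_self]]
      rw [B_back n (1 + 2 * (K : Int)) K (K - 1) (by omega) (1 + wsum n K)]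
    rw [hA, hB]
    ring
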